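-- pv_equiv track=rewrite | github.com/Zeydel/Advent-Of-Code | AoC25/Day04/Day04.py | get_acessible_rolls_with_removals
-- ===== SOURCE A (Python) =====
-- def get_neighbors(x, y):
--
--     neighbors = set()
--
--     for nx in range(x-1, x+2):
--         for ny in range(y-1, y+2):
--
--             if nx == x and ny == y:
--                 continue
--
--             neighbors.add((nx, ny))
--
--     return neighbors
--
-- def get_acessible_rolls_with_removals(rolls):
--
--     # Start by counting neighbors for each roll
--     neighbor_counts = dict()
--
--     for x, y in rolls:
--
--         neighbor_counts[(x, y)] = len(rolls & get_neighbors(x, y))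
--
--     # Init a queue of all rolls
--     queue = {roll for roll in rolls}
--
--     # Set of rolls that can be removed
--     removed = set()
--
--     # While there is something left in the queue
--     while len(queue) > 0:
--
--         # Pop next element
--         x, y = queue.pop()
--
--         # If the roll has already been removed, continue
--         if (x, y) in removed:
--             continue
--
--         # If the neighbor count is less than 4, add to set of removed rolls
--         if neighbor_counts[(x, y)] < 4:
--             removed.add((x,y))
--
--             # For every neighbor that is a roll
--             for nx, ny in (get_neighbors(x, y) & rolls):
--
--                 # Add to queue and decrement its neighbor count
--                 queue.add((nx, ny))
--                 neighbor_counts[(nx, ny)] -= 1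
--
--     # Return the lenght of removed rolls
--     return len(removed)
-- ===== SOURCE B (Python) =====
-- def get_acessible_rolls_with_removals(rolls):
--     # Pass-based peeling: repeatedly drop every survivor with fewer than 4
--     # surviving 8-neighbors, until a pass removes nothing.
--     surv = set(rolls)
--     while True:
--         doomed = {(x, y) for (x, y) in surv
--                   if sum((x + dx, y + dy) in surv
--                          for dx in (-1, 0, 1) for dy in (-1, 0, 1)
--                          if (dx, dy) != (0, 0)) < 4}
--         if not doomed:
--             return len(rolls) - len(surv)
--         surv -= doomed
-- ===== Notes on version B (the rewrite author's own statement) =====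
-- stated objective: simpler
-- what changed: Replaces A's worklist algorithm (neighbor-count dict, a queue of recheck candidates, incremental count decrements) with plain global passes that recompute each survivor's 8-neighbor count against the current survivor set and remove all under-4 rolls at once until a pass removes nothing; returns len(rolls) - len(survivors).
import Mathlib
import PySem

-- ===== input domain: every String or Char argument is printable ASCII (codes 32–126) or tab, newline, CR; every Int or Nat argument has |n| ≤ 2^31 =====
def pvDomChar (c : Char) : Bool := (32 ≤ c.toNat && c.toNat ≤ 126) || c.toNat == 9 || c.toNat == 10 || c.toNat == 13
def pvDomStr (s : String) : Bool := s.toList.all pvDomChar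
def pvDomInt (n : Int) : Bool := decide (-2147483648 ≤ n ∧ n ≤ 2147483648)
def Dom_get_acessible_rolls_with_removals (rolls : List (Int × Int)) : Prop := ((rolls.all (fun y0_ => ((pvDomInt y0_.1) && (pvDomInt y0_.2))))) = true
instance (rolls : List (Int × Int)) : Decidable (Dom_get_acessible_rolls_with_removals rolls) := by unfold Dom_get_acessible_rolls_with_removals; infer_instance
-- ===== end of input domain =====

-- B replaces A's worklist-with-decremented-counters peeling by plain repeated passes that
-- recompute each survivor's neighbor count from scratch (objective: simpler, not faster);
-- A's Python pops from a set in hash order — the result is order-independent (that is what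
-- the equivalence proof shows), the port pops the list head.

-- ===== PORT A =====
-- get_neighbors(x, y)
def pyGetNeighbors (x y : Int) : PySem.Set (Int × Int) :=
  (PySem.List.pyRange (x - 1) (x + 2)).foldl (fun nbrs nx =>
    (PySem.List.pyRange (y - 1) (y + 2)).foldl (fun nbrs ny =>
      if nx = x ∧ ny = y then nbrs else PySem.Set.add nbrs (nx, ny)) nbrs)
    PySem.Set.empty

-- the `while len(queue) > 0` loop; the fuel only makes the recursion structural and is
-- proved sufficient below (pyAqueueLoop_measure_le in the proof section)
def pyAqueueLoop (R : PySem.Set (Int × Int)) :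
    Nat → List (Int × Int) → PySem.Set (Int × Int) → PySem.Dict (Int × Int) Int →
    PySem.Set (Int × Int)
  | 0, _, removed, _ => removed
  | _ + 1, [], removed, _ => removed
  | fuel + 1, p :: qs, removed, counts =>
    if PySem.Set.contains removed p then
      pyAqueueLoop R fuel qs removed counts
    else if counts.getD p 0 < 4 then
      let nbrs := PySem.Set.inter (pyGetNeighbors p.1 p.2) R
      pyAqueueLoop R fuel
        (nbrs.foldl (fun q nb => PySem.Set.add q nb) qs)
        (PySem.Set.add removed p)
        (nbrs.foldl (fun d nb => d.modify nb 0 (fun c => c - 1)) counts)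
    else
      pyAqueueLoop R fuel qs removed counts

def get_acessible_rolls_with_removals (rolls : List (Int × Int)) : Int :=
  let R := PySem.Set.ofList rolls
  let counts := R.foldl
    (fun d q => d.insert q (PySem.Set.len (PySem.Set.inter R (pyGetNeighbors q.1 q.2))))
    PySem.Dict.empty
  PySem.Set.len (pyAqueueLoop R ((R.length + 1) * (R.length + 2)) R PySem.Set.empty counts)

-- ===== PORT B =====
-- the generator-sum of membership tests over the 8 offsets
def bNbrCount (surv : PySem.Set (Int × Int)) (x y : Int) : Nat :=
  (([-1, 0, 1] : List Int).flatMap (fun dx =>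
    ([-1, 0, 1] : List Int).flatMap (fun dy =>
      if dx = 0 ∧ dy = 0 then [] else [(dx, dy)]))).countP
    (fun d => PySem.Set.contains surv (x + d.1, y + d.2))

-- termination helper for bPeel (removing a nonempty doomed set shrinks the survivor list)
lemma pvFilterLengthLt (p : (Int × Int) → Bool) (l : List (Int × Int)) (x : Int × Int)
    (hx : x ∈ l) (hpx : p x = false) : (l.filter p).length < l.length := by
  induction l with
  | nil => cases hx
  | cons a rest ih =>
    rw [List.filter_cons]
    rcases List.mem_cons.mp hx with h | h
    · subst h
      rw [hpx]
      simp only [Bool.false_eq_true, if_false]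
      exact Nat.lt_succ_of_le (List.length_filter_le _ _)
    · by_cases hpa : p a = true
      · rw [hpa]
        simp only [if_true, List.length_cons]
        exact Nat.succ_lt_succ (ih h)
      · rw [Bool.eq_false_iff.mpr hpa]
        simp only [Bool.false_eq_true, if_false]
        exact Nat.lt_succ_of_lt (ih h)

lemma pvDiffLengthLt (s t : List (Int × Int)) (x : Int × Int) (hxs : x ∈ s) (hxt : x ∈ t) :
    (PySem.Set.diff s t).length < s.length := by
  unfold PySem.Set.diff
  exact pvFilterLengthLt _ _ x hxs (by simp [hxt])

def bDoomed (surv : PySem.Set (Int × Int)) : List (Int × Int) :=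
  surv.filter (fun p => bNbrCount surv p.1 p.2 < 4)

def bPeel (surv : PySem.Set (Int × Int)) : PySem.Set (Int × Int) :=
  if (bDoomed surv).isEmpty then surv
  else bPeel (PySem.Set.diff surv (bDoomed surv))
termination_by surv.length
decreasing_by
  rename_i h
  have hne : bDoomed surv ≠ [] := by simpa [List.isEmpty_iff] using h
  rcases List.exists_mem_of_ne_nil _ hne with ⟨x, hx⟩
  exact pvDiffLengthLt _ _ x (List.mem_filter.mp hx).1 hx

def get_acessible_rolls_with_removals_alt (rolls : List (Int × Int)) : Int :=
  let R := PySem.Set.ofList rolls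
  PySem.Set.len R - PySem.Set.len (bPeel R)

-- ===== PRECONDITION & SPEC =====
def Spec_get_acessible_rolls_with_removals (rolls : List (Int × Int)) (out : Int) : Prop := out = get_acessible_rolls_with_removals_alt rolls
instance (rolls : List (Int × Int)) (out : Int) : Decidable (Spec_get_acessible_rolls_with_removals rolls out) := by unfold Spec_get_acessible_rolls_with_removals; infer_instance

-- ===== CLAIM (what is proved, stated in full; the proofs are below) =====
def Claim_equal_get_acessible_rolls_with_removals : Prop := ∀ (rolls : List (Int × Int)), Dom_get_acessible_rolls_with_removals rolls → Spec_get_acessible_rolls_with_removals rolls (get_acessible_rolls_with_removals rolls)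

-- ===== LEMMAS AND PROOFS =====

lemma pvContainsEq (s : List (Int × Int)) (x : Int × Int) :
    PySem.Set.contains s x = decide (x ∈ s) := by
  by_cases h : x ∈ s <;> simp [h]

-- the 8-neighborhood as a concrete list, and the degree of p with respect to a list S
def nbrList (p : Int × Int) : List (Int × Int) :=
  [(p.1 - 1, p.2 - 1), (p.1 - 1, p.2), (p.1 - 1, p.2 + 1),
   (p.1, p.2 - 1), (p.1, p.2 + 1),
   (p.1 + 1, p.2 - 1), (p.1 + 1, p.2), (p.1 + 1, p.2 + 1)]

def Ndeg (S : List (Int × Int)) (p : Int × Int) : Nat :=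
  (nbrList p).countP (fun q => decide (q ∈ S))

lemma mem_nbrList (p q : Int × Int) :
    q ∈ nbrList p ↔ q ≠ p ∧ p.1 - 1 ≤ q.1 ∧ q.1 ≤ p.1 + 1 ∧ p.2 - 1 ≤ q.2 ∧ q.2 ≤ p.2 + 1 := by
  obtain ⟨a, b⟩ := p; obtain ⟨c, d⟩ := q
  simp [nbrList, Prod.ext_iff] <;> omega

lemma nbrList_symm (p q : Int × Int) : q ∈ nbrList p ↔ p ∈ nbrList q := by
  obtain ⟨a, b⟩ := p; obtain ⟨c, d⟩ := q
  simp [mem_nbrList, Prod.ext_iff] <;> omega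

lemma nodup_nbrList (p : Int × Int) : (nbrList p).Nodup := by
  obtain ⟨a, b⟩ := p
  simp [nbrList, Prod.ext_iff] <;> omega

lemma Ndeg_mono (S T : List (Int × Int)) (h : ∀ q ∈ S, q ∈ T) (p : Int × Int) :
    Ndeg S p ≤ Ndeg T p := by
  apply List.countP_mono_left
  intro q _ hq
  simp only [decide_eq_true_eq] at *
  exact h q hq

-- `range(x-1, x+2)` is [x-1, x, x+1]
lemma pyRange_window (x : Int) : PySem.List.pyRange (x - 1) (x + 2) = [x - 1, x, x + 1] := by
  rw [PySem.List.pyRange_one_cons (by omega), PySem.List.pyRange_one_cons (by omega),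
      PySem.List.pyRange_one_cons (by omega), PySem.List.pyRange_one_eq_nil (by omega)]
  norm_num

lemma pyGetNeighbors_eq (x y : Int) : pyGetNeighbors x y = nbrList (x, y) := by
  have s1 : PySem.Set.add (PySem.Set.empty : PySem.Set (Int × Int)) (x - 1, y - 1) =
      [(x - 1, y - 1)] := PySem.Set.add_of_not_mem (by simp [PySem.Set.empty])
  have s2 : PySem.Set.add [(x - 1, y - 1)] (x - 1, y) = [(x - 1, y - 1), (x - 1, y)] :=
    PySem.Set.add_of_not_mem (by simp only [List.mem_singleton, Prod.mk.injEq]; omega)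
  have s3 : PySem.Set.add [(x - 1, y - 1), (x - 1, y)] (x - 1, y + 1) =
      [(x - 1, y - 1), (x - 1, y), (x - 1, y + 1)] :=
    PySem.Set.add_of_not_mem (by
      simp only [List.mem_cons, List.mem_singleton, List.not_mem_nil, or_false, Prod.mk.injEq]
      omega)
  have s4 : PySem.Set.add [(x - 1, y - 1), (x - 1, y), (x - 1, y + 1)] (x, y - 1) =
      [(x - 1, y - 1), (x - 1, y), (x - 1, y + 1), (x, y - 1)] :=
    PySem.Set.add_of_not_mem (by
      simp only [List.mem_cons, List.mem_singleton, List.not_mem_nil, or_false, Prod.mk.injEq]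
      omega)
  have s5 : PySem.Set.add [(x - 1, y - 1), (x - 1, y), (x - 1, y + 1), (x, y - 1)] (x, y + 1) =
      [(x - 1, y - 1), (x - 1, y), (x - 1, y + 1), (x, y - 1), (x, y + 1)] :=
    PySem.Set.add_of_not_mem (by
      simp only [List.mem_cons, List.mem_singleton, List.not_mem_nil, or_false, Prod.mk.injEq]
      omega)
  have s6 : PySem.Set.add [(x - 1, y - 1), (x - 1, y), (x - 1, y + 1), (x, y - 1), (x, y + 1)]
      (x + 1, y - 1) =
      [(x - 1, y - 1), (x - 1, y), (x - 1, y + 1), (x, y - 1), (x, y + 1), (x + 1, y - 1)] :=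
    PySem.Set.add_of_not_mem (by
      simp only [List.mem_cons, List.mem_singleton, List.not_mem_nil, or_false, Prod.mk.injEq]
      omega)
  have s7 : PySem.Set.add [(x - 1, y - 1), (x - 1, y), (x - 1, y + 1), (x, y - 1), (x, y + 1),
      (x + 1, y - 1)] (x + 1, y) =
      [(x - 1, y - 1), (x - 1, y), (x - 1, y + 1), (x, y - 1), (x, y + 1), (x + 1, y - 1),
        (x + 1, y)] :=
    PySem.Set.add_of_not_mem (by
      simp only [List.mem_cons, List.mem_singleton, List.not_mem_nil, or_false, Prod.mk.injEq]
      omega)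
  have s8 : PySem.Set.add [(x - 1, y - 1), (x - 1, y), (x - 1, y + 1), (x, y - 1), (x, y + 1),
      (x + 1, y - 1), (x + 1, y)] (x + 1, y + 1) =
      [(x - 1, y - 1), (x - 1, y), (x - 1, y + 1), (x, y - 1), (x, y + 1), (x + 1, y - 1),
        (x + 1, y), (x + 1, y + 1)] :=
    PySem.Set.add_of_not_mem (by
      simp only [List.mem_cons, List.mem_singleton, List.not_mem_nil, or_false, Prod.mk.injEq]
      omega)
  simp only [pyGetNeighbors, pyRange_window, List.foldl_cons, List.foldl_nil, and_true,
    true_and, if_true]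
  rw [if_neg (by omega), if_neg (by omega), if_neg (by omega), if_neg (by omega),
      if_neg (by omega), if_neg (by omega), if_neg (by omega), if_neg (by omega)]
  rw [s1, s2, s3, s4, s5, s6, s7, s8]
  rfl

lemma pyGetNeighbors_eq' (p : Int × Int) : pyGetNeighbors p.1 p.2 = nbrList p := by
  rw [pyGetNeighbors_eq]

lemma bNbrCount_eq (S : List (Int × Int)) (p : Int × Int) :
    bNbrCount S p.1 p.2 = Ndeg S p := by
  obtain ⟨x, y⟩ := p
  have hoff : (([-1, 0, 1] : List Int).flatMap (fun dx =>
      ([-1, 0, 1] : List Int).flatMap (fun dy =>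
        if dx = 0 ∧ dy = 0 then [] else [(dx, dy)]))) =
      ([(-1, -1), (-1, 0), (-1, 1), (0, -1), (0, 1), (1, -1), (1, 0), (1, 1)] :
        List (Int × Int)) := by decide
  simp only [bNbrCount, hoff, Ndeg, nbrList, List.countP_cons, List.countP_nil,
    PySem.Set.contains_eq_listContains, pvContainsEq]
  norm_num [show ∀ a : Int, a + -1 = a - 1 from fun a => by ring]

-- generic counting helpers
lemma countP_split (l rem R : List (Int × Int)) (hsub : ∀ x ∈ rem, x ∈ R) :
    l.countP (fun q => decide (q ∈ R)) =
      l.countP (fun q => decide (q ∈ rem)) +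
      l.countP (fun q => decide (q ∈ R) && !decide (q ∈ rem)) := by
  induction l with
  | nil => simp
  | cons a t ih =>
    by_cases haR : a ∈ R <;> by_cases harem : a ∈ rem <;>
      simp [List.countP_cons, haR, harem, ih] <;> first | omega | exact absurd (hsub a harem) haR

lemma survdeg_eq (R rem : List (Int × Int)) (hsub : ∀ x ∈ rem, x ∈ R) (p : Int × Int) :
    ((nbrList p).countP (fun q => decide (q ∈ R) && !decide (q ∈ rem)) : Int) =
      (Ndeg R p : Int) - (Ndeg rem p : Int) := by
  have h := countP_split (nbrList p) rem R hsub
  unfold Ndeg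
  omega

lemma countP_mem_append_singleton (l rem : List (Int × Int)) (p : Int × Int) (hp : p ∉ rem) :
    l.countP (fun q => decide (q ∈ rem ++ [p])) =
      l.countP (fun q => decide (q ∈ rem)) + l.count p := by
  induction l with
  | nil => simp
  | cons a t ih =>
    rw [List.countP_cons, List.countP_cons, List.count_cons, ih]
    by_cases h2 : p = a
    · subst h2
      simp [hp, List.mem_append]
      omega
    · by_cases h1 : a ∈ rem <;>
        simp [h1, List.mem_append, show ¬ a = p from fun h => h2 h.symm,
          show (p == a) = false from by simp [h2]] <;> omega

lemma getD_foldl_modify_sub_one (l : List (Int × Int)) :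
    ∀ (d : PySem.Dict (Int × Int) Int) (q : Int × Int),
      (l.foldl (fun d nb => d.modify nb 0 (fun c => c - 1)) d).getD q 0 =
        d.getD q 0 - l.count q := by
  induction l with
  | nil => simp
  | cons a t ih =>
    intro d q
    rw [List.foldl_cons, ih, PySem.Dict.getD_modify, List.count_cons]
    by_cases h : q = a
    · rw [if_pos h, if_pos (by simp [h]), h]
      push_cast
      ring
    · rw [if_neg h, if_neg (by simp [show ¬a = q from fun e => h e.symm])]
      simp

lemma getD_foldl_insert_of_not_mem (l : List (Int × Int)) (f : Int × Int → Int) :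
    ∀ (d : PySem.Dict (Int × Int) Int) (q : Int × Int), q ∉ l →
      (l.foldl (fun d p => d.insert p (f p)) d).getD q 0 = d.getD q 0 := by
  induction l with
  | nil => simp
  | cons a t ih =>
    intro d q hq
    simp only [List.mem_cons, not_or] at hq
    simp only [List.foldl_cons, ih _ _ hq.2, PySem.Dict.getD_insert, if_neg hq.1]

lemma getD_foldl_insert (l : List (Int × Int)) (f : Int × Int → Int) (hnd : l.Nodup) :
    ∀ (d : PySem.Dict (Int × Int) Int) (q : Int × Int), q ∈ l →
      (l.foldl (fun d p => d.insert p (f p)) d).getD q 0 = f q := by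
  induction l with
  | nil => simp
  | cons a t ih =>
    intro d q hq
    rcases List.mem_cons.mp hq with h | h
    · subst h
      rw [List.foldl_cons, getD_foldl_insert_of_not_mem _ _ _ _ (List.nodup_cons.mp hnd).1,
        PySem.Dict.getD_insert_self]
    · exact ih (List.nodup_cons.mp hnd).2 _ _ h

lemma nodup_length_le (l L : List (Int × Int)) (hl : l.Nodup) (hsub : ∀ x ∈ l, x ∈ L) :
    l.length ≤ L.length := by
  calc l.length = l.toFinset.card := (List.toFinset_card_of_nodup hl).symm
    _ ≤ L.toFinset.card := Finset.card_le_card (by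
        intro x hx
        simp only [List.mem_toFinset] at *
        exact hsub x hx)
    _ ≤ L.length := List.toFinset_card_le L

lemma countP_congr' (l : List (Int × Int)) (p q : (Int × Int) → Bool)
    (h : ∀ x ∈ l, p x = q x) : l.countP p = l.countP q := by
  induction l with
  | nil => simp
  | cons a t ih =>
    simp only [List.countP_cons, h a List.mem_cons_self,
      ih (fun x hx => h x (List.mem_cons_of_mem a hx))]

lemma length_filter_mem_comm (a b : List (Int × Int)) (ha : a.Nodup) (hb : b.Nodup) :
    (a.filter (fun x => decide (x ∈ b))).length = (b.filter (fun x => decide (x ∈ a))).length := by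
  have h1 : (a.filter (fun x => decide (x ∈ b))).toFinset = a.toFinset ∩ b.toFinset := by
    ext x; simp [List.mem_filter]
  have h2 : (b.filter (fun x => decide (x ∈ a))).toFinset = b.toFinset ∩ a.toFinset := by
    ext x; simp [List.mem_filter]
  rw [← List.toFinset_card_of_nodup (ha.filter _), ← List.toFinset_card_of_nodup (hb.filter _),
    h1, h2, Finset.inter_comm]

-- A's initial counter value: |rolls ∩ neighbors(p)| is the degree of p in R
lemma init_count_eq (R : List (Int × Int)) (hR : R.Nodup) (p : Int × Int) :
    PySem.Set.len (PySem.Set.inter R (pyGetNeighbors p.1 p.2)) = (Ndeg R p : Int) := by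
  unfold PySem.Set.len PySem.Set.inter
  rw [pyGetNeighbors_eq']
  congr 1
  have hf : R.filter (fun x => PySem.Set.contains (nbrList p) x) =
      R.filter (fun x => decide (x ∈ nbrList p)) :=
    List.filter_congr (fun x _ => by rw [pvContainsEq])
  rw [hf, length_filter_mem_comm R (nbrList p) hR (nodup_nbrList p), Ndeg,
    List.countP_eq_length_filter]

-- ===== the main invariant lemma for A's worklist loop =====
lemma aLoop_main (R : List (Int × Int)) (hR : R.Nodup) :
    ∀ (fuel : Nat) (queue removed : List (Int × Int)) (counts : PySem.Dict (Int × Int) Int),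
      queue.Nodup → removed.Nodup →
      (∀ p ∈ queue, p ∈ R) → (∀ p ∈ removed, p ∈ R) →
      (∀ p ∈ R, counts.getD p 0 = (Ndeg R p : Int) - (Ndeg removed p : Int)) →
      (∀ p ∈ R, p ∉ removed →
        (nbrList p).countP (fun q => decide (q ∈ R) && !decide (q ∈ removed)) < 4 → p ∈ queue) →
      (∀ S : List (Int × Int), (∀ p ∈ S, p ∈ R) → (∀ p ∈ S, 4 ≤ Ndeg S p) → ∀ p ∈ S, p ∉ removed) →
      (R.length + 1) * (R.length - removed.length) + queue.length ≤ fuel →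
      ((pyAqueueLoop R fuel queue removed counts).Nodup ∧
        (∀ p ∈ pyAqueueLoop R fuel queue removed counts, p ∈ R) ∧
        (∀ p ∈ R, p ∉ pyAqueueLoop R fuel queue removed counts →
          4 ≤ (nbrList p).countP
            (fun q => decide (q ∈ R) && !decide (q ∈ pyAqueueLoop R fuel queue removed counts))) ∧
        (∀ S : List (Int × Int), (∀ p ∈ S, p ∈ R) → (∀ p ∈ S, 4 ≤ Ndeg S p) →
          ∀ p ∈ S, p ∉ pyAqueueLoop R fuel queue removed counts)) := by
  intro fuel
  induction fuel with
  | zero =>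
    intro queue removed counts hqnd hrnd hqsub hrsub hcounts hcover hprot hm
    have hq : queue = [] := by
      cases queue with
      | nil => rfl
      | cons a t => simp [List.length_cons] at hm
    subst hq
    show removed.Nodup ∧ _
    refine ⟨hrnd, hrsub, ?_, hprot⟩
    intro p hpR hpnr
    by_contra hlt
    push_neg at hlt
    exact List.not_mem_nil (hcover p hpR hpnr hlt)
  | succ fuel ih =>
    intro queue removed counts hqnd hrnd hqsub hrsub hcounts hcover hprot hm
    cases queue with
    | nil =>
      show removed.Nodup ∧ _
      refine ⟨hrnd, hrsub, ?_, hprot⟩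
      intro p hpR hpnr
      by_contra hlt
      push_neg at hlt
      exact List.not_mem_nil (hcover p hpR hpnr hlt)
    | cons p qs =>
      have hqs_nd : qs.Nodup := (List.nodup_cons.mp hqnd).2
      have hqs_sub : ∀ x ∈ qs, x ∈ R := fun x hx => hqsub x (List.mem_cons_of_mem p hx)
      have hpR : p ∈ R := hqsub p List.mem_cons_self
      by_cases hpr : p ∈ removed
      · -- already removed: skip
        have hc : PySem.Set.contains removed p = true := by
          rw [pvContainsEq]; simpa using hpr
        have step : pyAqueueLoop R (fuel + 1) (p :: qs) removed counts =
            pyAqueueLoop R fuel qs removed counts := by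
          simp only [pyAqueueLoop]
          rw [if_pos hc]
        rw [step]
        apply ih qs removed counts hqs_nd hrnd hqs_sub hrsub hcounts ?_ hprot ?_
        · intro p' h1 h2 h3
          rcases List.mem_cons.mp (hcover p' h1 h2 h3) with h | h
          · exact absurd (h ▸ hpr) h2
          · exact h
        · simp only [List.length_cons] at hm
          omega
      · have hc : PySem.Set.contains removed p = false := by
          rw [pvContainsEq]; simpa using hpr
        -- the survivor degree of p, as hypothesis-friendly facts
        have hsd : ((nbrList p).countP (fun q => decide (q ∈ R) && !decide (q ∈ removed)) : Int) =
            (Ndeg R p : Int) - (Ndeg removed p : Int) := survdeg_eq R removed hrsub p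
        by_cases hlt : counts.getD p 0 < 4
        · -- remove p, push its neighbors
          have hcnt := hcounts p hpR
          have hsdlt : (nbrList p).countP (fun q => decide (q ∈ R) && !decide (q ∈ removed)) < 4 := by
            omega
          set nbrs := PySem.Set.inter (pyGetNeighbors p.1 p.2) R with hnbrs_def
          have hnbrs_mem : ∀ q, q ∈ nbrs ↔ q ∈ nbrList p ∧ q ∈ R := by
            intro q
            rw [hnbrs_def, PySem.Set.mem_inter, pyGetNeighbors_eq']
          have hnbrs_nd : nbrs.Nodup := by
            rw [hnbrs_def]
            exact PySem.Set.nodup_inter _ _ (pyGetNeighbors_eq' p ▸ nodup_nbrList p)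
          have hadd : PySem.Set.add removed p = removed ++ [p] := PySem.Set.add_of_not_mem hpr
          have step : pyAqueueLoop R (fuel + 1) (p :: qs) removed counts =
              pyAqueueLoop R fuel (PySem.Set.update qs nbrs) (removed ++ [p])
                (nbrs.foldl (fun d nb => d.modify nb 0 (fun c => c - 1)) counts) := by
            simp only [pyAqueueLoop]
            rw [if_neg (by rw [hc]; simp), if_pos hlt, ← hadd, ← hnbrs_def]
            exact rfl
          rw [step]
          have hrem'_nd : (removed ++ [p]).Nodup := by
            simp only [List.nodup_append, List.nodup_singleton, true_and]
            refine ⟨hrnd, ?_⟩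
            intro a ha b hb
            rw [List.mem_singleton.mp hb]
            exact fun he => hpr (he ▸ ha)
          have hrem'_sub : ∀ x ∈ removed ++ [p], x ∈ R := by
            intro x hx
            rcases List.mem_append.mp hx with h | h
            · exact hrsub x h
            · rw [List.mem_singleton.mp h]; exact hpR
          have hq'_nd : (PySem.Set.update qs nbrs).Nodup := PySem.Set.nodup_update _ _ hqs_nd
          have hq'_mem : ∀ x, x ∈ PySem.Set.update qs nbrs ↔ x ∈ qs ∨ x ∈ nbrs :=
            fun x => PySem.Set.mem_update qs nbrs x
          have hq'_sub : ∀ x ∈ PySem.Set.update qs nbrs, x ∈ R := by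
            intro x hx
            rcases (hq'_mem x).mp hx with h | h
            · exact hqs_sub x h
            · exact ((hnbrs_mem x).mp h).2
          apply ih _ _ _ hq'_nd hrem'_nd hq'_sub hrem'_sub ?_ ?_ ?_ ?_
          · -- counts invariant
            intro q hqR
            rw [getD_foldl_modify_sub_one, hcounts q hqR]
            have hcnt_nbrs : nbrs.count q = if q ∈ nbrList p then 1 else 0 := by
              by_cases hq : q ∈ nbrList p
              · simp only [hq, if_true]
                exact List.count_eq_one_of_mem hnbrs_nd ((hnbrs_mem q).mpr ⟨hq, hqR⟩)
              · simp only [hq, if_false]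
                exact List.count_eq_zero.mpr (fun hmem => hq ((hnbrs_mem q).mp hmem).1)
            have hdeg' : (Ndeg (removed ++ [p]) q : Int) =
                (Ndeg removed q : Int) + (if q ∈ nbrList p then 1 else 0) := by
              unfold Ndeg
              rw [countP_mem_append_singleton _ _ _ hpr]
              have : (nbrList q).count p = if q ∈ nbrList p then 1 else 0 := by
                by_cases hq : q ∈ nbrList p
                · simp only [hq, if_true]
                  exact List.count_eq_one_of_mem (nodup_nbrList q) ((nbrList_symm q p).mpr hq)
                · simp only [hq, if_false]
                  exact List.count_eq_zero.mpr (fun hmem => hq ((nbrList_symm q p).mp hmem))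
              rw [this]
              by_cases hq : q ∈ nbrList p <;> simp [hq]
            rw [hcnt_nbrs, hdeg']
            by_cases hq : q ∈ nbrList p <;> simp [hq] <;> omega
          · -- cover invariant
            intro p' h1 h2 h3
            have h2' : p' ∉ removed ∧ p' ≠ p := by
              constructor
              · exact fun hm' => h2 (List.mem_append.mpr (Or.inl hm'))
              · exact fun he => h2 (List.mem_append.mpr (Or.inr (by simp [he])))
            by_cases hnb : p' ∈ nbrList p
            · exact (hq'_mem p').mpr (Or.inr ((hnbrs_mem p').mpr ⟨hnb, h1⟩))
            · have hcong : (nbrList p').countP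
                  (fun q => decide (q ∈ R) && !decide (q ∈ removed ++ [p])) =
                  (nbrList p').countP (fun q => decide (q ∈ R) && !decide (q ∈ removed)) := by
                apply countP_congr'
                intro q hq
                have : q ∈ removed ++ [p] ↔ q ∈ removed := by
                  simp only [List.mem_append, List.mem_singleton]
                  constructor
                  · rintro (h | h)
                    · exact h
                    · exfalso
                      apply hnb
                      subst h
                      exact (nbrList_symm p' q).mp hq
                  · exact Or.inl
                simp [this]
              rw [hcong] at h3
              rcases List.mem_cons.mp (hcover p' h1 h2'.1 h3) with h | h
              · exact absurd h h2'.2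
              · exact (hq'_mem p').mpr (Or.inl h)
          · -- protection invariant
            intro S hS1 hS2 p' hp'S
            have hold : p' ∉ removed := hprot S hS1 hS2 p' hp'S
            intro hmem
            rcases List.mem_append.mp hmem with h | h
            · exact hold h
            · -- p' = p : p is in the closed set S, contradiction with its low degree
              have hpp : p ∈ S := (List.mem_singleton.mp h) ▸ hp'S
              have hle : Ndeg S p ≤
                  (nbrList p).countP (fun q => decide (q ∈ R) && !decide (q ∈ removed)) := by
                apply List.countP_mono_left
                intro q _ hq
                simp only [decide_eq_true_eq] at hq
                simp only [Bool.and_eq_true, decide_eq_true_eq, Bool.not_eq_true',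
                  decide_eq_false_iff_not]
                exact ⟨hS1 q hq, hprot S hS1 hS2 q hq⟩
              have := hS2 p hpp
              omega
          · -- measure
            have hq'_len : (PySem.Set.update qs nbrs).length ≤ R.length :=
              nodup_length_le _ _ hq'_nd hq'_sub
            have hrlen : removed.length + 1 ≤ R.length := by
              have := nodup_length_le _ _ hrem'_nd hrem'_sub
              simpa using this
            rw [List.length_append, List.length_singleton]
            have hsplit : R.length - removed.length = (R.length - (removed.length + 1)) + 1 := by
              omega
            rw [hsplit, Nat.mul_add, Nat.mul_one] at hm
            simp only [List.length_cons] at hm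
            generalize (R.length + 1) * (R.length - (removed.length + 1)) = M at hm ⊢
            omega
        · -- degree ≥ 4: p survives this pass
          have step : pyAqueueLoop R (fuel + 1) (p :: qs) removed counts =
              pyAqueueLoop R fuel qs removed counts := by
            simp only [pyAqueueLoop]
            rw [if_neg (by rw [hc]; simp), if_neg hlt]
          rw [step]
          apply ih qs removed counts hqs_nd hrnd hqs_sub hrsub hcounts ?_ hprot ?_
          · intro p' h1 h2 h3
            rcases List.mem_cons.mp (hcover p' h1 h2 h3) with h | h
            · subst h
              have hcnt := hcounts p' h1
              have hsd' := survdeg_eq R removed hrsub p'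
              omega
            · exact h
          · simp only [List.length_cons] at hm
            omega

-- ===== the invariant lemma for B's pass loop =====
lemma bPeel_spec : ∀ (n : Nat) (S : List (Int × Int)), S.length ≤ n → S.Nodup →
    ((bPeel S).Nodup ∧ (∀ p ∈ bPeel S, p ∈ S) ∧
      (∀ p ∈ bPeel S, 4 ≤ Ndeg (bPeel S) p) ∧
      (∀ C : List (Int × Int), (∀ p ∈ C, p ∈ S) → (∀ p ∈ C, 4 ≤ Ndeg C p) →
        ∀ p ∈ C, p ∈ bPeel S)) := by
  intro n
  induction n with
  | zero =>
    intro S hlen hnd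
    have hS : S = [] := by
      cases S with
      | nil => rfl
      | cons a t => simp at hlen
    subst hS
    have hb : bPeel [] = [] := by rw [bPeel]; simp [bDoomed]
    rw [hb]
    exact ⟨List.nodup_nil, by simp, by simp,
      fun C hC1 _ p hp => absurd (hC1 p hp) List.not_mem_nil⟩
  | succ n ih =>
    intro S hlen hnd
    by_cases h : bDoomed S = []
    · have hb : bPeel S = S := by
        rw [bPeel, if_pos (by rw [h]; rfl)]
      rw [hb]
      refine ⟨hnd, fun p hp => hp, ?_, fun C hC1 _ p hp => hC1 p hp⟩
      intro p hp
      have h2 := List.filter_eq_nil_iff.mp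
        (show S.filter (fun p => decide (bNbrCount S p.1 p.2 < 4)) = [] from h) p hp
      simp only [decide_eq_true_eq] at h2
      rw [bNbrCount_eq] at h2
      omega
    · have hb : bPeel S = bPeel (PySem.Set.diff S (bDoomed S)) := by
        rw [bPeel, if_neg (fun hh => h (List.isEmpty_iff.mp hh))]
      have hS'_mem : ∀ q, q ∈ PySem.Set.diff S (bDoomed S) ↔ q ∈ S ∧ ¬ (Ndeg S q < 4) := by
        intro q
        rw [PySem.Set.mem_diff, bDoomed]
        constructor
        · rintro ⟨h1, h2⟩
          exact ⟨h1, fun hlt => h2 (List.mem_filter.mpr ⟨h1, by simp [bNbrCount_eq, hlt]⟩)⟩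
        · rintro ⟨h1, h2⟩
          refine ⟨h1, fun hmem => ?_⟩
          have h3 := (List.mem_filter.mp hmem).2
          simp only [decide_eq_true_eq] at h3
          rw [bNbrCount_eq] at h3
          exact h2 h3
      have hS'_nd : (PySem.Set.diff S (bDoomed S)).Nodup := PySem.Set.nodup_diff _ _ hnd
      have hS'_len : (PySem.Set.diff S (bDoomed S)).length ≤ n := by
        rcases List.exists_mem_of_ne_nil _ h with ⟨x, hx⟩
        have hx' : x ∈ S := by
          rw [bDoomed] at hx
          exact (List.mem_filter.mp hx).1
        have hlt := pvDiffLengthLt S (bDoomed S) x hx' hx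
        omega
      obtain ⟨h1, h2, h3, h4⟩ := ih _ hS'_len hS'_nd
      rw [hb]
      refine ⟨h1, ?_, h3, ?_⟩
      · intro p hp
        exact ((hS'_mem p).mp (h2 p hp)).1
      · intro C hC1 hC2 p hp
        apply h4 C ?_ hC2 p hp
        intro q hq
        rw [hS'_mem q]
        refine ⟨hC1 q hq, ?_⟩
        have hle : Ndeg C q ≤ Ndeg S q := Ndeg_mono C S hC1 q
        have := hC2 q hq
        omega

-- ===== glue: both ports count the complement of the same maximal 4-closed subset =====
lemma ab_eq (rolls : List (Int × Int)) :
    get_acessible_rolls_with_removals rolls = get_acessible_rolls_with_removals_alt rolls := by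
  set R := PySem.Set.ofList rolls with hRdef
  have hRnd : R.Nodup := PySem.Set.nodup_ofList rolls
  -- the initial counter dictionary
  set counts0 := R.foldl
    (fun d q => d.insert q (PySem.Set.len (PySem.Set.inter R (pyGetNeighbors q.1 q.2))))
    PySem.Dict.empty with hc0def
  have hcounts0 : ∀ p ∈ R, counts0.getD p 0 = (Ndeg R p : Int) - (Ndeg ([] : List (Int × Int)) p : Int) := by
    intro p hp
    rw [hc0def, getD_foldl_insert R _ hRnd _ p hp, init_count_eq R hRnd p]
    simp [Ndeg]
  have hmeas : (R.length + 1) * (R.length - ([] : List (Int × Int)).length) + R.length ≤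
      (R.length + 1) * (R.length + 2) := by
    have hexp : (R.length + 1) * (R.length + 2) = (R.length + 1) * R.length + (R.length + 1) * 2 := by
      ring
    simp only [List.length_nil, Nat.sub_zero]
    rw [hexp]
    generalize (R.length + 1) * R.length = M
    omega
  obtain ⟨hond, hosub, hoclose, hoprot⟩ :=
    aLoop_main R hRnd ((R.length + 1) * (R.length + 2)) R [] counts0 hRnd List.nodup_nil
      (fun p hp => hp) (by simp) hcounts0
      (by intro p hp _ _; exact hp)
      (by intro S _ _ p _; exact List.not_mem_nil)
      hmeas
  set out := pyAqueueLoop R ((R.length + 1) * (R.length + 2)) R [] counts0 with houtdef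
  obtain ⟨htnd, htsub, htclose, htmax⟩ := bPeel_spec R.length R (le_refl _) hRnd
  set T := bPeel R with hTdef
  -- membership equivalence: T = R \ out
  have hmem : ∀ q, q ∈ T ↔ q ∈ R ∧ q ∉ out := by
    intro q
    constructor
    · intro hq
      have hqR : q ∈ R := htsub q hq
      refine ⟨hqR, hoprot T (fun p hp => htsub p hp) htclose q hq⟩
    · rintro ⟨hqR, hqo⟩
      -- the A-survivors form a closed set contained in R
      apply htmax (R.filter (fun x => decide (x ∉ out)))
      · intro p hp; exact (List.mem_filter.mp hp).1
      · intro p hp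
        have hp1 := (List.mem_filter.mp hp).1
        have hp2 : p ∉ out := by
          have := (List.mem_filter.mp hp).2; simpa using this
        have h4 := hoclose p hp1 hp2
        have hcong : (nbrList p).countP (fun q => decide (q ∈ R) && !decide (q ∈ out)) =
            Ndeg (R.filter (fun x => decide (x ∉ out))) p := by
          apply countP_congr'
          intro x _
          by_cases h1 : x ∈ R <;> by_cases h2 : x ∈ out <;>
            simp [h1, h2, List.mem_filter]
        rw [← hcong]
        exact h4
      · exact List.mem_filter.mpr ⟨hqR, by simpa using hqo⟩
  -- counting
  have hfsum : R.length = (R.filter (fun x => decide (x ∈ out))).length +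
      (R.filter (fun x => !decide (x ∈ out))).length :=
    List.length_eq_length_filter_add _
  have hperm1 : (R.filter (fun x => decide (x ∈ out))).length = out.length := by
    apply List.Perm.length_eq
    rw [List.perm_ext_iff_of_nodup (hRnd.filter _) hond]
    intro q
    simp only [List.mem_filter, decide_eq_true_eq]
    exact ⟨fun h => h.2, fun h => ⟨hosub q h, h⟩⟩
  have hperm2 : (R.filter (fun x => !decide (x ∈ out))).length = T.length := by
    apply List.Perm.length_eq
    rw [List.perm_ext_iff_of_nodup (hRnd.filter _) htnd]
    intro q
    simp only [List.mem_filter, Bool.not_eq_true', decide_eq_false_iff_not]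
    rw [hmem q]
  have hA : get_acessible_rolls_with_removals rolls = (out.length : Int) := rfl
  have hB : get_acessible_rolls_with_removals_alt rolls = (R.length : Int) - (T.length : Int) := rfl
  rw [hA, hB] <;> omega

-- ===== VERDICT (by name: the statement is the Claim_ definition above) =====
theorem get_acessible_rolls_with_removals_spec : Claim_equal_get_acessible_rolls_with_removals := by
  intro rolls _
  unfold Spec_get_acessible_rolls_with_removals
  exact ab_eq rolls
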